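-- pv_equiv track=rewrite | github.com/medidbella/ForbiddenFunctionScaner | get_functins.py | is_called
-- ===== SOURCE A (Python) =====
-- def in_quote(string, i):
-- 	i -= 1
-- 	while i >= 0:
-- 		if string[i] == 39 or string[i] == 34:
-- 			return 1
-- 		i -= 1
-- 	return 0
--
-- def is_called(list, j, i):
-- 	i += 1
-- 	while (j < len(list)):
-- 		while (i < len(list[j])):
-- 			if (list[j][i] == '{' and not in_quote(list[j], i)):
-- 				return 0
-- 			if (list[j][i] == ';' and not in_quote(list[j], i)):
-- 				return 1
-- 			i += 1
-- 		i = 0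
-- 		j += 1
-- 	return 0
-- ===== SOURCE B (Python) =====
-- def is_called(list, j, i):
--     if j >= len(list):
--         return 0
--     text = list[j][i + 1:] + "".join(list[j + 1:])
--     semi = text.find(';')
--     brace = text.find('{')
--     if semi == -1:
--         return 0
--     if brace == -1 or semi < brace:
--         return 1
--     return 0
-- ===== Notes on version B (the rewrite author's own statement) =====
-- stated objective: faster
-- what changed: B concatenates the remaining text once (slice + join) and decides the result by comparing the first positions of ';' and '{' found by str.find, instead of A's per-character nested index loops with an in_quote backward rescan that can never fire (Python compares a 1-char string with the ints 39/34, which is always False).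
-- outside the precondition, e.g. on is_called([';{ ', 'bab}', 'aa}}'], -2, 5): A returns 1, B returns 0; on is_called([';a'], 0, -2): A returns 1, B returns 0; on is_called(['ab'], 0, -9): A raises IndexError, B returns 0
import Mathlib
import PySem

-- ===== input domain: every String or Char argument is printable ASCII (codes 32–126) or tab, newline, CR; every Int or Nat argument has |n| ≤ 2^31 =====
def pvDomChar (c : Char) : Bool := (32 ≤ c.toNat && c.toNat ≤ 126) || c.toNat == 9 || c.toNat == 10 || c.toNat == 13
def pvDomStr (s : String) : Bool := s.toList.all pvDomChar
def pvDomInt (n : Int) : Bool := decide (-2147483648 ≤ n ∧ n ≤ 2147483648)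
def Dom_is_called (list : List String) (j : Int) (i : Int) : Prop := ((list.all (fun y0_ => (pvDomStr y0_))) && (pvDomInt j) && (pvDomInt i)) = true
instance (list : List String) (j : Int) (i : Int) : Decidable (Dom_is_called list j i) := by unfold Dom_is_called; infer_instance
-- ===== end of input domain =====

-- B concatenates the tail text once and compares the first positions of ';' and '{' (str.find),
-- instead of A's per-character nested index loops; A's in_quote helper compares a 1-char string
-- with the ints 39/34, which is always False in Python, so it never fires and B needs no quote logic.

-- ===== PORT A =====
-- Python 'str == int' (a 1-char string compared with 39/34) is always False: ported literally.
def pyStrEqInt (_c : Char) (_n : Int) : Bool := false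

-- 'while i >= 0: …' of in_quote; fuel only makes the Int-indexed countdown total.
def in_quote_go (s : List Char) (i : Int) : Nat → Int
  | 0 => 0
  | f + 1 =>
    if 0 ≤ i then
      match PySem.List.pyGet? s i with
      | some c =>
          if pyStrEqInt c 39 || pyStrEqInt c 34 then 1 else in_quote_go s (i - 1) f
      | none => 0
    else 0

def in_quote (s : List Char) (i : Int) : Int := in_quote_go s (i - 1) i.toNat

-- A's inner 'while i < len(list[j])' loop: some r = 'return r', none = fall through.
def scan_line (s : List Char) (i : Int) : Nat → Option Int
  | 0 => none
  | f + 1 =>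
    if i < (s.length : Int) then
      match PySem.List.pyGet? s i with
      | some c =>
          if c == '{' && (in_quote s i == 0) then some 0
          else if c == ';' && (in_quote s i == 0) then some 1
          else scan_line s (i + 1) f
      | none => none
    else none

-- A's outer 'while j < len(list)' loop.
def outer_go (list : List String) (j i : Int) : Nat → Int
  | 0 => 0
  | f + 1 =>
    if j < (list.length : Int) then
      match PySem.List.pyGet? list j with
      | some line =>
          match scan_line line.toList i (line.toList.length + 1) with
          | some r => r
          | none => outer_go list (j + 1) 0 f
      | none => 0
    else 0

def is_called (list : List String) (j : Int) (i : Int) : Int :=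
  outer_go list j (i + 1) (list.length + 1)

-- ===== PORT B =====
def is_called_alt (list : List String) (j : Int) (i : Int) : Int :=
  if (list.length : Int) ≤ j then 0
  else
    let text : List Char :=
      PySem.List.slice (PySem.List.pyGetD list j "").toList (some (i + 1)) none
        ++ PySem.Chars.join [] ((PySem.List.slice list (some (j + 1)) none).map String.toList)
    let semi := PySem.Chars.find text [';']
    let brace := PySem.Chars.find text ['{']
    if semi = -1 then 0
    else if brace = -1 ∨ semi < brace then 1
    else 0

-- ===== PRECONDITION & SPEC =====
-- Pre_ excludes a negative row index j on a non-exhausted list, and column starts i < -1 on an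
-- in-range row: there A either raises IndexError or scans rows/characters picked by Python's
-- accidental negative-index wraparound (possibly revisiting rows), behaviour nobody would specify.
def Pre_is_called (list : List String) (j : Int) (i : Int) : Prop :=
  (list.length : Int) ≤ j ∨ (0 ≤ j ∧ -1 ≤ i)
instance (list : List String) (j : Int) (i : Int) : Decidable (Pre_is_called list j i) := by
  unfold Pre_is_called; infer_instance

def pvWitness_is_called : List String × Int × Int := (["ab;"], 0, -1)

def Spec_is_called (list : List String) (j : Int) (i : Int) (out : Int) : Prop := out = is_called_alt list j i
instance (list : List String) (j : Int) (i : Int) (out : Int) : Decidable (Spec_is_called list j i out) := by unfold Spec_is_called; infer_instance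

-- ===== CLAIM (what is proved, stated in full; the proofs are below) =====
def Claim_equal_is_called : Prop := ∀ (list : List String) (j : Int) (i : Int), Dom_is_called list j i → Pre_is_called list j i → Spec_is_called list j i (is_called list j i)

-- ===== LEMMAS AND PROOFS =====

-- first '{' (↦ 0) or ';' (↦ 1) in a character list — the value both programs are driven by
def firstTrig : List Char → Option Int
  | [] => none
  | c :: cs => if c = '{' then some 0 else if c = ';' then some 1 else firstTrig cs

theorem firstTrig_append (a b : List Char) :
    firstTrig (a ++ b) = (firstTrig a).or (firstTrig b) := by
  induction a with
  | nil => simp [firstTrig]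
  | cons c cs ih => by_cases h1 : c = '{' <;> by_cases h2 : c = ';' <;>
      simp [firstTrig, h1, h2, ih]

theorem in_quote_go_eq_zero (s : List Char) (i : Int) (f : Nat) : in_quote_go s i f = 0 := by
  induction f generalizing i with
  | zero => rfl
  | succ f ih =>
      unfold in_quote_go
      split
      · cases PySem.List.pyGet? s i <;> simp [pyStrEqInt, ih]
      · rfl

theorem scan_line_eq (s : List Char) (k f : Nat) (hf : s.length + 1 - k ≤ f) :
    scan_line s (k : Int) f = firstTrig (s.drop k) := by
  induction f generalizing k with
  | zero =>
      have hk : s.length < k := by omega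
      simp [List.drop_eq_nil_of_le (le_of_lt hk), firstTrig, scan_line]
  | succ f ih =>
      unfold scan_line
      by_cases hk : k < s.length
      · rw [if_pos (by exact_mod_cast hk)]
        rw [PySem.List.pyGet?_natCast, List.getElem?_eq_getElem hk]
        have hdrop : s.drop k = s[k] :: s.drop (k + 1) := List.drop_eq_getElem_cons hk
        have hrec : ((k : Int) + 1) = ((k + 1 : Nat) : Int) := by push_cast; ring
        by_cases h1 : s[k] = '{'
        · simp [h1, in_quote, in_quote_go_eq_zero, hdrop, firstTrig]
        · by_cases h2 : s[k] = ';'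
          · simp [h2, in_quote, in_quote_go_eq_zero, hdrop, firstTrig]
          · have ihk := ih (k + 1) (by omega)
            rw [hrec, ihk, hdrop]
            simp [in_quote, in_quote_go_eq_zero, h1, h2, firstTrig]
      · rw [if_neg (by exact_mod_cast hk)]
        simp [List.drop_eq_nil_of_le (Nat.le_of_not_lt hk), firstTrig]

-- the text A still has to scan, starting at row k, column m of that row
def concatText (list : List String) (k m : Nat) : List Char :=
  match list.drop k with
  | [] => []
  | s :: rest => s.toList.drop m ++ (rest.map String.toList).flatten

theorem concatText_zero (list : List String) (k : Nat) :
    concatText list k 0 = ((list.drop k).map String.toList).flatten := by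
  unfold concatText
  cases h : list.drop k with
  | nil => simp
  | cons s rest => simp

theorem outer_eq (list : List String) (k m f : Nat) (hf : list.length + 1 - k ≤ f) :
    outer_go list (k : Int) (m : Int) f = (firstTrig (concatText list k m)).getD 0 := by
  induction f generalizing k m with
  | zero =>
      have hk : list.length < k := by omega
      unfold outer_go concatText
      rw [List.drop_eq_nil_of_le (le_of_lt hk)]
      simp [firstTrig]
  | succ f ih =>
      unfold outer_go
      by_cases hk : k < list.length
      · rw [if_pos (by exact_mod_cast hk)]
        rw [PySem.List.pyGet?_natCast, List.getElem?_eq_getElem hk]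
        have hdrop : list.drop k = list[k] :: list.drop (k + 1) := List.drop_eq_getElem_cons hk
        have hscan := scan_line_eq list[k].toList m (list[k].toList.length + 1) (by omega)
        unfold concatText
        rw [hdrop]
        dsimp only
        rw [hscan]
        cases htr : firstTrig (list[k].toList.drop m) with
        | some r => simp [firstTrig_append, htr]
        | none =>
            have ih0 := ih (k + 1) 0 (by omega)
            push_cast at ih0
            rw [show ((k : Int) + 1) = ((k + 1 : Nat) : Int) by push_cast; ring]
            push_cast
            rw [ih0, concatText_zero]
            simp [firstTrig_append, htr]
      · rw [if_neg (by exact_mod_cast hk)]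
        unfold concatText
        rw [List.drop_eq_nil_of_le (Nat.le_of_not_lt hk)]
        simp [firstTrig]

-- find.go at offset k is find at 0, shifted — specific to B's two single-character searches
theorem find_go_shift (sub t : List Char) (k : Nat) :
    PySem.Chars.find.go sub t k =
      if PySem.Chars.find.go sub t 0 = -1 then -1 else PySem.Chars.find.go sub t 0 + k := by
  induction t generalizing k with
  | nil => unfold PySem.Chars.find.go; split <;> simp
  | cons a t ih =>
      unfold PySem.Chars.find.go
      split
      · simp
      · have hge : -1 ≤ PySem.Chars.find.go sub t 0 := PySem.Chars.neg_one_le_find t sub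
        rw [ih (k + 1), ih 1]
        split_ifs <;> push_cast <;> omega

theorem find_single_cons (a c : Char) (t : List Char) :
    PySem.Chars.find (a :: t) [c] =
      if c = a then 0
      else if PySem.Chars.find t [c] = -1 then -1 else PySem.Chars.find t [c] + 1 := by
  show PySem.Chars.find.go [c] (a :: t) 0 = _
  unfold PySem.Chars.find.go
  by_cases h : c = a
  · simp [List.isPrefixOf, h]
  · rw [if_neg h, if_neg (show ¬(List.isPrefixOf [c] (a :: t) = true) by simp [List.isPrefixOf, h])]
    simpa [PySem.Chars.find] using find_go_shift [c] t 1

theorem find_single_nil (c : Char) : PySem.Chars.find [] [c] = -1 := rfl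

theorem b_logic (t : List Char) :
    (if PySem.Chars.find t [';'] = -1 then (0 : Int)
     else if PySem.Chars.find t ['{'] = -1 ∨ PySem.Chars.find t [';'] < PySem.Chars.find t ['{'] then 1
     else 0) = (firstTrig t).getD 0 := by
  induction t with
  | nil => simp [find_single_nil, firstTrig]
  | cons a t ih =>
      have hs := PySem.Chars.neg_one_le_find t [';']
      have hb := PySem.Chars.neg_one_le_find t ['{']
      rw [find_single_cons a ';' t, find_single_cons a '{' t]
      by_cases h1 : a = '{'
      · subst h1
        simp only [firstTrig, reduceIte, reduceCtorEq, Option.getD_some]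
        split_ifs <;> first | omega | (simp_all; omega) | simp_all
      · by_cases h2 : a = ';'
        · subst h2
          simp only [firstTrig, reduceIte, Option.getD_some, if_neg h1]
          split_ifs <;> first | (simp_all; omega) | simp_all
        · simp only [firstTrig, if_neg h1, if_neg h2, if_neg (Ne.symm h1), if_neg (Ne.symm h2), ← ih]
          split_ifs <;> omega

theorem join_nil_eq_flatten (ps : List (List Char)) : PySem.Chars.join [] ps = ps.flatten := by
  show List.intercalate [] ps = ps.flatten
  induction ps with
  | nil => simp [List.intercalate]
  | cons p ps ih =>
      cases ps with
      | nil => simp [List.intercalate]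
      | cons q ps =>
          simp only [List.intercalate, List.intersperse] at *
          simp_all

-- ===== VERDICT (by name: the statement is the Claim_ definition above) =====
theorem is_called_spec : Claim_equal_is_called := by
  intro list j i _hdom hpre
  unfold Spec_is_called is_called is_called_alt
  by_cases hj : (list.length : Int) ≤ j
  · rw [if_pos hj]
    unfold outer_go
    rw [if_neg (by omega)]
  · rw [if_neg hj]
    rcases hpre with h | ⟨hj0, hi⟩
    · omega
    · obtain ⟨k, rfl⟩ : ∃ k : Nat, j = (k : Int) := ⟨j.toNat, (Int.toNat_of_nonneg hj0).symm⟩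
      obtain ⟨m, hm⟩ : ∃ m : Nat, i + 1 = (m : Int) := ⟨(i + 1).toNat, (Int.toNat_of_nonneg (by omega)).symm⟩
      have hk : k < list.length := by exact_mod_cast not_le.mp hj
      rw [hm, outer_eq list k m (list.length + 1) (by omega)]
      have hdrop : list.drop k = list[k] :: list.drop (k + 1) := List.drop_eq_getElem_cons hk
      have hget : PySem.List.pyGetD list ((k : Nat) : Int) "" = list[k] := by
        rw [PySem.List.pyGetD_natCast]
        exact List.getD_eq_getElem list "" hk
      have htext :
          PySem.List.slice (PySem.List.pyGetD list ((k : Nat) : Int) "").toList (some ((m : Nat) : Int)) none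
            ++ PySem.Chars.join [] ((PySem.List.slice list (some (((k : Nat) : Int) + 1)) none).map String.toList)
          = concatText list k m := by
        rw [hget, PySem.List.slice_from_natCast,
          show (((k : Nat) : Int) + 1) = (((k + 1 : Nat)) : Int) by push_cast; ring,
          PySem.List.slice_from_natCast, join_nil_eq_flatten]
        unfold concatText
        rw [hdrop]
      rw [htext]
      exact (b_logic (concatText list k m)).symm
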